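-- pv_equiv track=rewrite | github.com/FelixTheC/hackerrank_exercises | hackerrank/hk_credit_card.py | cd_repeated_digits
-- ===== SOURCE A (Python) =====
-- def cd_repeated_digits(card_number: str) -> bool:
--     results = []
--     if '-' in card_number:
--         card_number = card_number.replace('-', '')
--     for i in range(len(card_number)):
--         nums = card_number[i: i + 4]
--         results.append(len(nums) - len(set(nums)) < 3)
--     return all(results)
-- ===== SOURCE B (Python) =====
-- def cd_repeated_digits(card_number: str) -> bool:
--     if '-' in card_number:
--         card_number = card_number.replace('-', '')
--     run = 0
--     prev = None
--     for ch in card_number: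
--         if ch == prev:
--             run += 1
--             if run == 4:
--                 return False
--         else:
--             prev = ch
--             run = 1
--     return True
-- ===== Notes on version B (the rewrite author's own statement) =====
-- stated objective: faster
-- what changed: Replaces the per-index window extraction with a set built for every overlapping 4-char slice by a single linear scan keeping a run-length counter of equal adjacent characters, returning False as soon as a run reaches 4.
import Mathlib
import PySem

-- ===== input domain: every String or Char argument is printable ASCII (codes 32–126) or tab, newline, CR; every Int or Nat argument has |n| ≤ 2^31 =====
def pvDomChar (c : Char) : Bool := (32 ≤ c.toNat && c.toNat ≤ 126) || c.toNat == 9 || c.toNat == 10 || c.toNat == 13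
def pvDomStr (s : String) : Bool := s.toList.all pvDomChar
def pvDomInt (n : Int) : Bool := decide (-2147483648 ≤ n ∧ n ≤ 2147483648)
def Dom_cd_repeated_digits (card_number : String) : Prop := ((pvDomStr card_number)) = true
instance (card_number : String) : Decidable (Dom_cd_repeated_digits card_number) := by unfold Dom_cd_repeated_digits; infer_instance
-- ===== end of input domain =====

-- B replaces A's per-window slice+set test by a single run-length-counter scan with early exit (constant-factor faster; same True/False result).

-- ===== PORT A =====
def cd_repeated_digits (card_number : String) : Bool :=
  let card := if PySem.Str.isIn "-" card_number then PySem.Str.replace card_number "-" "" else card_number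
  let cs := card.toList
  let results : List Bool := (PySem.List.pyRange 0 (cs.length : Int) 1).foldl
    (fun acc i =>
      let nums := PySem.List.slice cs (some i) (some (i + 4))
      acc ++ [decide ((nums.length : Int) - ((PySem.Set.ofList nums).length : Int) < 3)]) []
  results.all id

-- ===== PORT B =====
-- the for-loop of Source B with early return, as structural recursion over (chars, prev, run)
def pvRunLoop : List Char → Option Char → Nat → Bool
  | [], _, _ => true
  | ch :: rest, prev, run =>
    if some ch == prev then
      (if run + 1 == 4 then false else pvRunLoop rest prev (run + 1))
    else pvRunLoop rest (some ch) 1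

def cd_repeated_digits_alt (card_number : String) : Bool :=
  let card := if PySem.Str.isIn "-" card_number then PySem.Str.replace card_number "-" "" else card_number
  pvRunLoop card.toList none 0

-- ===== PRECONDITION & SPEC =====
def Spec_cd_repeated_digits (card_number : String) (out : Bool) : Prop := out = cd_repeated_digits_alt card_number
instance (card_number : String) (out : Bool) : Decidable (Spec_cd_repeated_digits card_number out) := by unfold Spec_cd_repeated_digits; infer_instance

-- ===== CLAIM (what is proved, stated in full; the proofs are below) =====
def Claim_equal_cd_repeated_digits : Prop := ∀ (card_number : String), Dom_cd_repeated_digits card_number → Spec_cd_repeated_digits card_number (cd_repeated_digits card_number)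

-- ===== LEMMAS AND PROOFS =====

-- common characterisation: no four consecutive equal characters
def pvNoRun4 : List Char → Bool
  | a :: b :: c :: d :: r => !(a == b && b == c && c == d) && pvNoRun4 (b :: c :: d :: r)
  | _ => true

def pvOk (w : List Char) : Bool := decide ((w.length : Int) - ((PySem.Set.ofList w).length : Int) < 3)

def pvAAll (cs : List Char) : Bool := (List.range cs.length).all (fun k => pvOk ((cs.drop k).take 4))

theorem pvOk_short (w : List Char) (h : w.length ≤ 3) : pvOk w = true := by
  cases w with
  | nil => rfl
  | cons x xs =>
    have hx : x ∈ PySem.Set.ofList (x :: xs) := (PySem.Set.mem_ofList _ _).2 (List.mem_cons_self)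
    have h1 : 1 ≤ (PySem.Set.ofList (x :: xs)).length := List.length_pos_of_mem hx
    simp only [pvOk, decide_eq_true_eq]
    simp only [List.length_cons] at h ⊢
    omega

theorem pvOk_four (a b c d : Char) : pvOk [a, b, c, d] = !(a == b && b == c && c == d) := by
  by_cases h1 : a = b <;> by_cases h2 : b = c <;> by_cases h3 : c = d <;>
    simp [pvOk, PySem.Set.ofList, PySem.Set.add, PySem.Set.contains, h1, h2, h3] <;>
    split_ifs <;> simp_all

theorem pvAAll_cons (c : Char) (cs : List Char) :
    pvAAll (c :: cs) = (pvOk ((c :: cs).take 4) && pvAAll cs) := by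
  simp [pvAAll, List.range_succ_eq_map, Function.comp_def]

theorem pvAAll_eq_noRun4 : ∀ cs : List Char, pvAAll cs = pvNoRun4 cs := by
  intro cs
  induction cs with
  | nil => rfl
  | cons c cs ih =>
    rw [pvAAll_cons, ih]
    match cs with
    | [] => simp [pvNoRun4, pvOk_short]
    | [b] => simp [pvNoRun4, pvOk_short]
    | [b, d] => simp [pvNoRun4, pvOk_short]
    | b :: d :: e :: r =>
      have : (c :: b :: d :: e :: r).take 4 = [c, b, d, e] := rfl
      rw [this, pvOk_four]
      rfl

theorem pvNoRun4_cons_ne {a b : Char} (l : List Char) (h : a ≠ b) :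
    pvNoRun4 (a :: b :: l) = pvNoRun4 (b :: l) := by
  match l with
  | [] => rfl
  | [x] => rfl
  | x :: y :: r => simp [pvNoRun4, h]

theorem pvNoRun4_cons2_ne {a b : Char} (l : List Char) (h : a ≠ b) :
    pvNoRun4 (a :: a :: b :: l) = pvNoRun4 (b :: l) := by
  match l with
  | [] => rfl
  | x :: r =>
    have h2 : pvNoRun4 (a :: a :: b :: x :: r) = pvNoRun4 (a :: b :: x :: r) := by
      simp [pvNoRun4, h]
    rw [h2, pvNoRun4_cons_ne _ h]

theorem pvNoRun4_cons3_ne {a b : Char} (l : List Char) (h : a ≠ b) :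
    pvNoRun4 (a :: a :: a :: b :: l) = pvNoRun4 (b :: l) := by
  have h1 : pvNoRun4 (a :: a :: a :: b :: l) = pvNoRun4 (a :: a :: b :: l) := by
    simp [pvNoRun4, h]
  rw [h1, pvNoRun4_cons2_ne _ h]

theorem pvRunLoop_inv :
    ∀ (cs : List Char) (c : Char) (k : Nat), 1 ≤ k → k ≤ 3 →
      pvRunLoop cs (some c) k = pvNoRun4 (List.replicate k c ++ cs) := by
  intro cs
  induction cs with
  | nil =>
    intro c k h1 h3
    interval_cases k <;> rfl
  | cons ch rest ih =>
    intro c k h1 h3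
    by_cases hc : ch = c
    · subst hc
      simp only [pvRunLoop, beq_self_eq_true, if_pos]
      interval_cases k
      · rw [if_neg (by decide), ih ch 2 (by omega) (by omega)]; rfl
      · rw [if_neg (by decide), ih ch 3 (by omega) (by omega)]; rfl
      · rw [if_pos (by decide)]
        simp [pvNoRun4, List.replicate]
    · have hne : (some ch == some c) = false := by simp [hc]
      simp only [pvRunLoop, hne, Bool.false_eq_true]
      rw [ih ch 1 (by omega) (by omega)]
      have hcc : c ≠ ch := fun h => hc h.symm
      interval_cases k
      · exact (pvNoRun4_cons_ne _ hcc).symm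
      · exact (pvNoRun4_cons2_ne _ hcc).symm
      · exact (pvNoRun4_cons3_ne _ hcc).symm

theorem pvRunLoop_eq_noRun4 (cs : List Char) : pvRunLoop cs none 0 = pvNoRun4 cs := by
  cases cs with
  | nil => rfl
  | cons c rest =>
    have : (some c == (none : Option Char)) = false := rfl
    simp only [pvRunLoop, this, Bool.false_eq_true]
    rw [pvRunLoop_inv rest c 1 (by omega) (by omega)]
    rfl

theorem pvA_eq_pvAAll (cs : List Char) :
    ((PySem.List.pyRange 0 (cs.length : Int) 1).foldl
      (fun acc i =>
        let nums := PySem.List.slice cs (some i) (some (i + 4))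
        acc ++ [decide ((nums.length : Int) - ((PySem.Set.ofList nums).length : Int) < 3)]) []).all id
      = pvAAll cs := by
  rw [PySem.List.foldl_append_singleton_eq_map]
  rw [PySem.List.pyRange_zero_nat]
  simp only [List.nil_append, List.map_map, List.all_map, pvAAll, Function.comp_def, id]
  refine List.all_congr rfl ?_
  intro k
  have hs : PySem.List.slice cs (some (k : Int)) (some ((k : Int) + 4)) = (cs.drop k).take 4 :=
    PySem.List.slice_natCast_add cs k 4
  rw [hs]
  rfl

-- ===== VERDICT (by name: the statement is the Claim_ definition above) =====
theorem cd_repeated_digits_spec : Claim_equal_cd_repeated_digits := by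
  intro s _
  unfold Spec_cd_repeated_digits cd_repeated_digits cd_repeated_digits_alt
  simp only []
  rw [pvA_eq_pvAAll, pvAAll_eq_noRun4, pvRunLoop_eq_noRun4]
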